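-- pv_equiv track=rewrite | github.com/emilasplund/Gruprog | sprakmeny.py | antirovarsprak
-- ===== SOURCE A (Python) =====
-- def antirovarsprak(inrad):
--     utrad = ""
--     n = 0
--     while n < len(inrad):
--         p = n
--         if konsonantcheck(inrad[p]) is True:
--             n = n+3
--             utrad += inrad[p]
--         else:
--             utrad += inrad[p]
--             n = n+1
--     return utrad
--
-- def konsonantcheck(tkn):
--     konsonantlista = "qwrtpsdfghjklzxcvbnmQWRTPSDFGHJKLZXCVBNM"
--     a = 0
--     for x in konsonantlista:
--         if tkn == x:
--             a = 1
--     if a == 1: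
--         return True
--     else:
--         return False
-- ===== SOURCE B (Python) =====
-- import re
--
-- _CONS = "qwrtpsdfghjklzxcvbnmQWRTPSDFGHJKLZXCVBNM"
-- _PAT = re.compile("([" + _CONS + "]).{0,2}", re.DOTALL)
--
-- def antirovarsprak(inrad):
--     return _PAT.sub(r"\1", inrad)
-- ===== Notes on version B (the rewrite author's own statement) =====
-- stated objective: idiomatic
-- what changed: Replaced A's index-jumping while loop with its 40-character flag-scan consonant test by a single compiled-regex re.sub call whose pattern ([<consonants>]).{0,2} with DOTALL matches each consonant plus up to two following characters and substitutes the captured consonant.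
import Mathlib
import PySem

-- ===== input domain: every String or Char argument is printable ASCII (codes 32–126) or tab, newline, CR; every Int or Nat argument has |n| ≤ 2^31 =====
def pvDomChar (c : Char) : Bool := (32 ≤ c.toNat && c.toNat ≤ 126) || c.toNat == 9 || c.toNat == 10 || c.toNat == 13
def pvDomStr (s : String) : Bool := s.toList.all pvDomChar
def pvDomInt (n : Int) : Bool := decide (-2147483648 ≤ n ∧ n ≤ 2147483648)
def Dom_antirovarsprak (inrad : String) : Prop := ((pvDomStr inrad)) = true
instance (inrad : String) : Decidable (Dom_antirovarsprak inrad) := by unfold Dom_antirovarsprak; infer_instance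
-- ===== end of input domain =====

-- B replaces A's per-character index-jumping while loop by a single re.sub call with the
-- pattern ([<consonants>]).{0,2} (DOTALL), replacing each match by its captured consonant.

-- ===== PORT A =====
-- konsonantcheck: scans the whole consonant string, setting a flag on a match
def konsonantcheck (tkn : Char) : Bool :=
  let konsonantlista := "qwrtpsdfghjklzxcvbnmQWRTPSDFGHJKLZXCVBNM".toList
  let a := konsonantlista.foldl (fun a x => if tkn == x then 1 else a) (0 : Nat)
  if a = 1 then true else false

-- the while loop of A: index n over the characters, output accumulator utrad
def antirovarsprakLoop (s : List Char) (n : Nat) (utrad : List Char) : List Char :=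
  if h : n < s.length then
    let p := n
    if konsonantcheck s[p] = true then
      antirovarsprakLoop s (n + 3) (utrad ++ [s[p]])
    else
      antirovarsprakLoop s (n + 1) (utrad ++ [s[p]])
  else utrad
termination_by s.length - n

def antirovarsprak (inrad : String) : String :=
  String.ofList (antirovarsprakLoop inrad.toList 0 [])

-- ===== PORT B =====
-- the character class [<consonants>] of B's regex
def pvClass : List Char := "qwrtpsdfghjklzxcvbnmQWRTPSDFGHJKLZXCVBNM".toList

-- hand port of re.sub for B's pattern ([pvClass]).{0,2} with DOTALL (there is no Lean regex
-- library); exact for this pattern: the engine copies the characters before the leftmost match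
-- (the next class character, found by the scan-ahead takeWhile), emits the substitution \1
-- (the captured class character), lets the greedy .{0,2} consume up to 2 following characters
-- (any character under DOTALL, fewer only at end of string), and resumes after the match.
def pvReSub (s : List Char) : List Char :=
  match h : s.drop ((s.takeWhile (fun c => ¬ pvClass.contains c)).length) with
  | [] => s.takeWhile (fun c => ¬ pvClass.contains c)
  | c :: tl => s.takeWhile (fun c => ¬ pvClass.contains c) ++ [c] ++ pvReSub (tl.drop 2)
termination_by s.length
decreasing_by
  have h2 := congrArg List.length h
  simp only [List.length_drop, List.length_cons] at h2
  simp only [List.length_drop]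
  omega

def antirovarsprak_alt (inrad : String) : String :=
  String.ofList (pvReSub inrad.toList)

-- ===== PRECONDITION & SPEC =====
def Spec_antirovarsprak (inrad : String) (out : String) : Prop := out = antirovarsprak_alt inrad
instance (inrad : String) (out : String) : Decidable (Spec_antirovarsprak inrad out) := by unfold Spec_antirovarsprak; infer_instance

-- ===== CLAIM (what is proved, stated in full; the proofs are below) =====
def Claim_equal_antirovarsprak : Prop := ∀ (inrad : String), Dom_antirovarsprak inrad → Spec_antirovarsprak inrad (antirovarsprak inrad)

-- ===== LEMMAS AND PROOFS =====

-- reference recursion both ports are reduced to: keep a character, skip 2 after a consonant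
def pvSub : List Char → List Char
  | [] => []
  | c :: rest =>
    if pvClass.contains c = true then c :: pvSub (rest.drop 2) else c :: pvSub rest
termination_by l => l.length
decreasing_by all_goals (simp only [List.length_cons, List.length_drop]; omega)

theorem pvFoldFlag (tkn : Char) (l : List Char) (a : Nat) :
    l.foldl (fun a x => if tkn == x then 1 else a) a = if l.contains tkn then 1 else a := by
  induction l generalizing a with
  | nil => simp
  | cons x xs ih =>
    simp only [List.foldl_cons, ih]
    by_cases h1 : tkn ∈ xs
    · simp [h1]
    · by_cases h2 : tkn = x <;> simp [h1, h2]

theorem konsonantcheck_eq (c : Char) : konsonantcheck c = pvClass.contains c := by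
  unfold konsonantcheck
  show (if ((pvClass.foldl (fun a x => if c == x then 1 else a) (0 : Nat)) = 1) then true
        else false) = pvClass.contains c
  rw [pvFoldFlag]
  by_cases h : pvClass.contains c = true <;> simp_all

theorem loopA_eq (s : List Char) (n : Nat) (utrad : List Char) :
    antirovarsprakLoop s n utrad = utrad ++ pvSub (s.drop n) := by
  rw [antirovarsprakLoop]
  split
  · rename_i h
    have hd : s.drop n = s[n] :: s.drop (n + 1) := (List.getElem_cons_drop h).symm
    simp only [konsonantcheck_eq]
    have h3 : s.drop (n + 3) = (s.drop (n + 1)).drop 2 := by rw [List.drop_drop]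
    by_cases hc : pvClass.contains s[n] = true
    · rw [if_pos hc, loopA_eq s (n + 3), hd, pvSub, if_pos hc, h3]
      simp only [List.append_assoc, List.singleton_append]
    · rw [if_neg hc, loopA_eq s (n + 1), hd, pvSub, if_neg hc]
      simp only [List.append_assoc, List.singleton_append]
  · rename_i h
    rw [List.drop_eq_nil_of_le (Nat.le_of_not_lt h)]
    simp [pvSub]
termination_by s.length - n

theorem drop_takeWhile_len (p : Char → Bool) (s : List Char) :
    s.drop ((s.takeWhile p).length) = s.dropWhile p := by
  induction s with
  | nil => simp
  | cons c tl ih => cases hp : p c <;> simp [hp, ih]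

theorem pvSub_of_all_neg (s : List Char) (h : ∀ x ∈ s, pvClass.contains x = false) :
    pvSub s = s := by
  induction s with
  | nil => rw [pvSub]
  | cons c tl ih =>
    rw [pvSub, if_neg (by simpa using h c (by simp)), ih (fun x hx => h x (by simp [hx]))]

theorem pvSub_split (pre : List Char) (c : Char) (rest : List Char)
    (hpre : ∀ x ∈ pre, pvClass.contains x = false) (hc : pvClass.contains c = true) :
    pvSub (pre ++ c :: rest) = pre ++ c :: pvSub (rest.drop 2) := by
  induction pre with
  | nil => simp only [List.nil_append]; rw [pvSub, if_pos hc]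
  | cons d pre' ih =>
    simp only [List.cons_append]
    rw [pvSub, if_neg (by simpa using hpre d (by simp)),
      ih (fun x hx => hpre x (by simp [hx]))]

theorem reSub_len : ∀ (n : Nat) (s : List Char), s.length ≤ n → pvReSub s = pvSub s := by
  intro n
  induction n with
  | zero =>
    intro s hs
    have : s = [] := List.eq_nil_of_length_eq_zero (Nat.le_zero.mp hs)
    subst this
    rw [pvReSub.eq_def, pvSub]
    split <;> simp_all
  | succ n ih =>
    intro s hs
    rw [pvReSub.eq_def]
    split
    · rename_i h
      rw [drop_takeWhile_len] at h
      have hsplit := List.takeWhile_append_dropWhile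
        (p := fun c => ¬ pvClass.contains c) (l := s)
      rw [h, List.append_nil] at hsplit
      conv_rhs => rw [← hsplit]
      exact (pvSub_of_all_neg _ (fun x hx => by
        have := List.mem_takeWhile_imp hx
        simpa using this)).symm
    · rename_i c tl h
      rw [drop_takeWhile_len] at h
      have hsplit := List.takeWhile_append_dropWhile
        (p := fun c => ¬ pvClass.contains c) (l := s)
      rw [h] at hsplit
      have hc : pvClass.contains c = true := by
        have := List.head?_dropWhile_not (p := fun c => ¬ pvClass.contains c) (l := s)
        rw [h] at this
        simpa using this
      have hlen : tl.length < s.length := by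
        have := List.Sublist.length_le (List.dropWhile_sublist (p := fun c => ¬ pvClass.contains c) (l := s))
        rw [h] at this
        simp at this
        omega
      rw [ih ((tl.drop 2)) (by simp [List.length_drop]; omega)]
      conv_rhs => rw [← hsplit]
      rw [pvSub_split _ _ _ (fun x hx => by
        have := List.mem_takeWhile_imp hx
        simpa using this) hc]
      simp

theorem reSub_eq (s : List Char) : pvReSub s = pvSub s :=
  reSub_len s.length s (Nat.le_refl _)

-- ===== VERDICT (by name: the statement is the Claim_ definition above) =====
theorem antirovarsprak_spec : Claim_equal_antirovarsprak := by
  intro inrad _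
  unfold Spec_antirovarsprak antirovarsprak antirovarsprak_alt
  rw [loopA_eq, reSub_eq]
  simp
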